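-- pv_equiv track=rewrite | github.com/hiroki13/instance-based-ner | utils/data_utils.py | metrics_for_multi_class_spans
-- ===== SOURCE A (Python) =====
-- def metrics_for_multi_class_spans(batch_gold_spans, batch_pred_spans,
--                                   null_label_id=0):
--   correct = 0
--   p_total = 0
--   r_total = 0
--   for gold_spans, pred_spans in zip(batch_gold_spans, batch_pred_spans):
--     assert len(gold_spans) == len(pred_spans)
--     r_total += sum([1 for e in gold_spans if e > null_label_id])
--     p_total += sum([1 for e in pred_spans if e > null_label_id])
--     correct += sum(
--       [1 for t, p in zip(gold_spans, pred_spans) if t == p > null_label_id])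
--   return correct, p_total, r_total
-- ===== SOURCE B (Python) =====
-- def metrics_for_multi_class_spans(batch_gold_spans, batch_pred_spans,
--                                   null_label_id=0):
--   # Classify every aligned (gold, pred) position into one of 8 category codes,
--   # accumulate a single 8-bucket histogram, then derive the three counters
--   # arithmetically from the buckets.
--   hist = [0] * 8
--   for gold_spans, pred_spans in zip(batch_gold_spans, batch_pred_spans):
--     assert len(gold_spans) == len(pred_spans)
--     for t, p in zip(gold_spans, pred_spans):
--       hist[(1 if t > null_label_id else 0)
--            + (2 if p > null_label_id else 0)
--            + (4 if t == p else 0)] += 1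
--   correct = sum(hist[c] for c in range(8) if c & 6 == 6)
--   p_total = sum(hist[c] for c in range(8) if c & 2)
--   r_total = sum(hist[c] for c in range(8) if c & 1)
--   return correct, p_total, r_total
-- ===== Notes on version B (the rewrite author's own statement) =====
-- stated objective: alternative
-- what changed: Instead of summing three boolean comprehensions per sentence, B classifies each aligned (gold,pred) position into one of 8 category codes, accumulates a single 8-bucket histogram, and derives correct/p_total/r_total arithmetically from the buckets at the end.
import Mathlib
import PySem

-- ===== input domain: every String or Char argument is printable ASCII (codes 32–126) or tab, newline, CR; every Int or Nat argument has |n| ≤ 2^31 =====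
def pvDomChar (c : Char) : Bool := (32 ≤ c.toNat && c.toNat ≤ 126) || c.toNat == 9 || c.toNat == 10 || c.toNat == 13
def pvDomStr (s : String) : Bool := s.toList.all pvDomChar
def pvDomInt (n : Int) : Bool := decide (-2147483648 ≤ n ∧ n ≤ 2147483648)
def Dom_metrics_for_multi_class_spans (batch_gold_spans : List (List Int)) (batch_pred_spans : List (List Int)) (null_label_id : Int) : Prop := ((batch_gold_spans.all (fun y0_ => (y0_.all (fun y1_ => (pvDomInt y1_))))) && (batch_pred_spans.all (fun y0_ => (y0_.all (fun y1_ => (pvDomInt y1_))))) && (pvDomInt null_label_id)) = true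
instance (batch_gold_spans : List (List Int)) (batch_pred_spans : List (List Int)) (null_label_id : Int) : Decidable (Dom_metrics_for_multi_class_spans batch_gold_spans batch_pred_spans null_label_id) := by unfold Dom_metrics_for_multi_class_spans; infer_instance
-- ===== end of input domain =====

-- ===== PORT A =====
-- B replaces A's three per-sentence sum-comprehensions by one classification pass into an
-- 8-bucket histogram plus O(1) bucket arithmetic (alternative decomposition, same cost).
def metrics_for_multi_class_spans (batch_gold_spans : List (List Int)) (batch_pred_spans : List (List Int)) (null_label_id : Int) : Int × Int × Int :=
  (batch_gold_spans.zip batch_pred_spans).foldl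
    (fun (st : Int × Int × Int) gp =>
      let r_total := st.2.2 + ((gp.1.filter (fun e => e > null_label_id)).map (fun _ => (1 : Int))).sum
      let p_total := st.2.1 + ((gp.2.filter (fun e => e > null_label_id)).map (fun _ => (1 : Int))).sum
      let correct := st.1 + (((gp.1.zip gp.2).filter (fun tp => tp.1 == tp.2 && tp.2 > null_label_id)).map (fun _ => (1 : Int))).sum
      (correct, p_total, r_total))
    (0, 0, 0)

-- ===== PORT B =====
def pvCode (nl t p : Int) : Nat :=
  (if t > nl then 1 else 0) + (if p > nl then 2 else 0) + (if t = p then 4 else 0)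

-- hist[code] += 1  (code is always in range 0..7)
def pvBump (h : List Int) (i : Nat) : List Int := h.set i (h.getD i 0 + 1)

def pvHistInner : List (Int × Int) → Int → List Int → List Int
  | [], _, h => h
  | (t, p) :: rest, nl, h => pvHistInner rest nl (pvBump h (pvCode nl t p))

def pvHistOuter : List (List Int × List Int) → Int → List Int → List Int
  | [], _, h => h
  | (gs, ps) :: rest, nl, h => pvHistOuter rest nl (pvHistInner (gs.zip ps) nl h)

-- the three derived sums over range(8): c&6==6, c&2, c&1
def pvExtract (h : List Int) : Int × Int × Int :=
  ((((List.range 8).filter (fun c => c &&& 6 == 6)).map (fun c => h.getD c 0)).sum,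
   (((List.range 8).filter (fun c => c &&& 2 != 0)).map (fun c => h.getD c 0)).sum,
   (((List.range 8).filter (fun c => c &&& 1 != 0)).map (fun c => h.getD c 0)).sum)

def metrics_for_multi_class_spans_alt (batch_gold_spans : List (List Int)) (batch_pred_spans : List (List Int)) (null_label_id : Int) : Int × Int × Int :=
  pvExtract (pvHistOuter (batch_gold_spans.zip batch_pred_spans) null_label_id (List.replicate 8 0))

-- ===== PRECONDITION & SPEC =====
-- Pre_ excludes exactly the inputs on which A's assert fails (AssertionError): some zipped pair of span lists has unequal lengths.
def Pre_metrics_for_multi_class_spans (batch_gold_spans : List (List Int)) (batch_pred_spans : List (List Int)) (null_label_id : Int) : Prop :=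
  ((batch_gold_spans.zip batch_pred_spans).all (fun pr => pr.1.length == pr.2.length)) = true
instance (batch_gold_spans : List (List Int)) (batch_pred_spans : List (List Int)) (null_label_id : Int) : Decidable (Pre_metrics_for_multi_class_spans batch_gold_spans batch_pred_spans null_label_id) := by unfold Pre_metrics_for_multi_class_spans; infer_instance

def pvWitness_metrics_for_multi_class_spans : List (List Int) × List (List Int) × Int :=
  ([[1, 0], [2]], [[1, 2], [0]], 0)

def Spec_metrics_for_multi_class_spans (batch_gold_spans : List (List Int)) (batch_pred_spans : List (List Int)) (null_label_id : Int) (out : Int × Int × Int) : Prop := out = metrics_for_multi_class_spans_alt batch_gold_spans batch_pred_spans null_label_id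
instance (batch_gold_spans : List (List Int)) (batch_pred_spans : List (List Int)) (null_label_id : Int) (out : Int × Int × Int) : Decidable (Spec_metrics_for_multi_class_spans batch_gold_spans batch_pred_spans null_label_id out) := by unfold Spec_metrics_for_multi_class_spans; infer_instance

-- ===== CLAIM =====
def Claim_equal_metrics_for_multi_class_spans : Prop := ∀ (batch_gold_spans : List (List Int)) (batch_pred_spans : List (List Int)) (null_label_id : Int), Dom_metrics_for_multi_class_spans batch_gold_spans batch_pred_spans null_label_id → Pre_metrics_for_multi_class_spans batch_gold_spans batch_pred_spans null_label_id → Spec_metrics_for_multi_class_spans batch_gold_spans batch_pred_spans null_label_id (metrics_for_multi_class_spans batch_gold_spans batch_pred_spans null_label_id)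

-- ===== LEMMAS AND PROOFS =====
-- the per-position contribution of a (gold, pred) pair to (correct, p_total, r_total)
def pvDelta (nl t p : Int) : Int × Int × Int :=
  ((if t = p ∧ p > nl then 1 else 0), (if p > nl then 1 else 0), (if t > nl then 1 else 0))

def pvAdd (x y : Int × Int × Int) : Int × Int × Int := (x.1 + y.1, x.2.1 + y.2.1, x.2.2 + y.2.2)

theorem pvExtract_eval (a0 a1 a2 a3 a4 a5 a6 a7 : Int) :
    pvExtract [a0, a1, a2, a3, a4, a5, a6, a7] = (a6 + a7, a2 + a3 + a6 + a7, a1 + a3 + a5 + a7) := by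
  simp [pvExtract, List.range_succ, List.getD]
  omega

theorem pvExtract_bump (nl t p : Int) (a0 a1 a2 a3 a4 a5 a6 a7 : Int) :
    pvExtract (pvBump [a0, a1, a2, a3, a4, a5, a6, a7] (pvCode nl t p)) =
      pvAdd (pvExtract [a0, a1, a2, a3, a4, a5, a6, a7]) (pvDelta nl t p) := by
  by_cases h1 : t > nl <;> by_cases h2 : p > nl <;> by_cases h3 : t = p <;>
    simp [pvBump, pvCode, pvDelta, pvAdd, h1, h2, h3, pvExtract_eval, List.set,
      List.getD, Prod.ext_iff] <;> omega

def pvLen8 (h : List Int) : Prop := ∃ a0 a1 a2 a3 a4 a5 a6 a7, h = [a0, a1, a2, a3, a4, a5, a6, a7]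

theorem pvBump_len8 (h : List Int) (i : Nat) (hl : pvLen8 h) : pvLen8 (pvBump h i) := by
  obtain ⟨a0, a1, a2, a3, a4, a5, a6, a7, rfl⟩ := hl
  unfold pvBump pvLen8
  rcases i with _ | _ | _ | _ | _ | _ | _ | _ | i <;> simp [List.set]

def pvSumDelta (l : List (Int × Int)) (nl : Int) : Int × Int × Int :=
  l.foldr (fun tp acc => pvAdd (pvDelta nl tp.1 tp.2) acc) (0, 0, 0)

theorem pvAdd_assoc (x y z : Int × Int × Int) : pvAdd (pvAdd x y) z = pvAdd x (pvAdd y z) := by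
  simp [pvAdd, Prod.ext_iff]; omega

theorem pvHistInner_extract (l : List (Int × Int)) (nl : Int) :
    ∀ h : List Int, pvLen8 h →
      pvLen8 (pvHistInner l nl h) ∧
      pvExtract (pvHistInner l nl h) = pvAdd (pvExtract h) (pvSumDelta l nl) := by
  induction l with
  | nil =>
    intro h hl
    refine ⟨hl, ?_⟩
    simp [pvHistInner, pvSumDelta, pvAdd]
  | cons tp rest ih =>
    intro h hl
    obtain ⟨t, p⟩ := tp
    have hl' := pvBump_len8 h (pvCode nl t p) hl
    obtain ⟨hlen, heq⟩ := ih (pvBump h (pvCode nl t p)) hl'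
    refine ⟨hlen, ?_⟩
    obtain ⟨a0, a1, a2, a3, a4, a5, a6, a7, rfl⟩ := hl
    simp only [pvHistInner, heq, pvExtract_bump]
    simp only [pvSumDelta, List.foldr_cons]
    rw [pvAdd_assoc]

theorem pvSumDelta_eq (gs ps : List Int) (nl : Int) (h : gs.length = ps.length) :
    pvSumDelta (gs.zip ps) nl =
      ((((gs.zip ps).filter (fun tp => tp.1 == tp.2 && tp.2 > nl)).map (fun _ => (1 : Int))).sum,
       ((ps.filter (fun e => e > nl)).map (fun _ => (1 : Int))).sum,
       ((gs.filter (fun e => e > nl)).map (fun _ => (1 : Int))).sum) := by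
  induction gs generalizing ps with
  | nil =>
    cases ps with
    | nil => simp [pvSumDelta]
    | cons q qs => simp at h
  | cons t ts ih =>
    cases ps with
    | nil => simp at h
    | cons p qs =>
      simp only [List.length_cons, Nat.add_right_cancel_iff] at h
      simp only [List.zip_cons_cons, pvSumDelta, List.foldr_cons, List.filter_cons]
      have := ih qs h
      simp only [pvSumDelta] at this
      rw [this]
      by_cases hp : p > nl <;> by_cases ht : t > nl <;> by_cases htp : t = p <;>
        simp [pvAdd, pvDelta, hp, ht, htp]

theorem pvHistOuter_extract (l : List (List Int × List Int)) (nl : Int)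
    (hlen : ∀ pr ∈ l, pr.1.length = pr.2.length) :
    ∀ (h : List Int) (c pt rt : Int), pvLen8 h → pvExtract h = (c, pt, rt) →
      pvExtract (pvHistOuter l nl h) =
        l.foldl
          (fun (st : Int × Int × Int) gp =>
            let r_total := st.2.2 + ((gp.1.filter (fun e => e > nl)).map (fun _ => (1 : Int))).sum
            let p_total := st.2.1 + ((gp.2.filter (fun e => e > nl)).map (fun _ => (1 : Int))).sum
            let correct := st.1 + (((gp.1.zip gp.2).filter (fun tp => tp.1 == tp.2 && tp.2 > nl)).map (fun _ => (1 : Int))).sum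
            (correct, p_total, r_total))
          (c, pt, rt) := by
  induction l with
  | nil => intro h c pt rt _ hx; simpa [pvHistOuter] using hx
  | cons gp rest ih =>
    intro h c pt rt hl hx
    obtain ⟨gs, ps⟩ := gp
    have hgp : gs.length = ps.length := hlen (gs, ps) (List.mem_cons_self ..)
    obtain ⟨hl', heq⟩ := pvHistInner_extract (gs.zip ps) nl h hl
    rw [pvSumDelta_eq gs ps nl hgp] at heq
    rw [hx] at heq
    simp only [pvHistOuter, List.foldl_cons]
    exact ih (fun pr hpr => hlen pr (List.mem_cons_of_mem _ hpr))
      _ _ _ _ hl' (by simpa [pvAdd] using heq)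

-- ===== VERDICT =====
theorem metrics_for_multi_class_spans_spec : Claim_equal_metrics_for_multi_class_spans := by
  intro g p nl _ hpre
  unfold Pre_metrics_for_multi_class_spans at hpre
  simp only [List.all_eq_true, beq_iff_eq] at hpre
  unfold Spec_metrics_for_multi_class_spans metrics_for_multi_class_spans metrics_for_multi_class_spans_alt
  rw [pvHistOuter_extract (g.zip p) nl hpre (List.replicate 8 0) 0 0 0
    ⟨0, 0, 0, 0, 0, 0, 0, 0, by decide⟩ (by decide)]
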